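-- pv_equiv track=rewrite | github.com/Oktovivian/Tubes_TBA_Kelompok-9 | FA_TBA_Kelompok9.py | kurawalBelakang
-- ===== SOURCE A (Python) =====
-- def inTerminal(teks, terminal):
--     status = True
--     i = 0
--     while i < len(teks)-1 and status:
--         if teks[i] not in terminal:
--             status = False
--         i+=1
--     return status
--
-- def kurawalBelakang(teks):
--     terminal=['}']
--     daftarState=['Q0','kurawalBlk']
--     tabel=[['kurawalBlk'], ['error']]
--     state='Q0'
--     i=0
--     teks = ''.join(teks)
--     teks+='#'
--     status=teks[i] != '#' and inTerminal(teks, terminal)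
--     while (status and teks[i]!='#'):
--         state=tabel[daftarState.index(state)][terminal.index(teks[i])]
--         i+=1
--         if (state=='error'):
--             status=False
--
--     if state != 'kurawalBlk':
--         state = 'error'
--     return state
-- ===== SOURCE B (Python) =====
-- def kurawalBelakang(teks):
--     teks = ''.join(teks)
--     return 'kurawalBlk' if teks == '}' else 'error'
-- ===== Notes on version B (the rewrite author's own statement) =====
-- stated objective: simpler
-- what changed: Replaced the transition-table finite-state automaton (inTerminal prescan plus an indexed while loop over the string with a '#' sentinel) by a single closed-form equality test: the automaton accepts exactly the one-character string '}', so B returns 'kurawalBlk' iff ''.join(teks) == '}'.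
import Mathlib
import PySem

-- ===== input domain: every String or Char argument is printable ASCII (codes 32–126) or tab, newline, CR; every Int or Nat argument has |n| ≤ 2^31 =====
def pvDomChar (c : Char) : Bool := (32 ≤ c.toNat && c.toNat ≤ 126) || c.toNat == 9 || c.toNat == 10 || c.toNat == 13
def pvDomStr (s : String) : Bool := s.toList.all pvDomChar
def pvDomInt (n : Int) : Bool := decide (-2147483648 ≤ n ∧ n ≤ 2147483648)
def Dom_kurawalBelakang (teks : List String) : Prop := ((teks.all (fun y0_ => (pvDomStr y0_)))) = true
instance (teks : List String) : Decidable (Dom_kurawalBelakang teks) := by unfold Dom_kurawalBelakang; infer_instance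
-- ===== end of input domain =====

-- B replaces A's transition-table automaton by the closed-form test ''.join(teks) == '}' (simpler).

-- ===== PORT A =====
-- inTerminal's while loop, with fuel (fuel = len(teks) always suffices: the loop body runs at most len-1 times).
def inTerminalLoop (teks terminal : List Char) (fuel i : Nat) (status : Bool) : Bool :=
  match fuel with
  | 0 => status
  | fuel + 1 =>
    if i < teks.length - 1 ∧ status = true then
      -- teks[i]: in range by the loop guard (i < len-1), so the getD default is never used
      inTerminalLoop teks terminal fuel (i + 1)
        (if teks.getD i '#' ∈ terminal then status else false)
    else status

def inTerminal (teks terminal : List Char) : Bool :=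
  inTerminalLoop teks terminal teks.length 0 true

-- the main while loop of kurawalBelakang, with fuel (fuel = len(teks) suffices: the '#' sentinel
-- is hit after at most len-1 iterations).  The 'none' fallthroughs mark spots where Python would
-- raise (IndexError/ValueError); they are unreachable because of the sentinel and the loop guard.
def kurawalBelakangLoop (teks : List Char) (fuel : Nat) (state : String) (i : Nat) (status : Bool) : String :=
  match fuel with
  | 0 => state
  | fuel + 1 =>
    match PySem.List.pyGet? teks (Int.ofNat i) with
    | none => state
    | some c =>
      if status = true ∧ c ≠ '#' then
        match PySem.List.index? ["Q0", "kurawalBlk"] state, PySem.List.index? ['}'] c with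
        | some si, some ci =>
          match ([["kurawalBlk"], ["error"]][si]?.bind (fun row => row[ci]?)) with
          | some state' =>
            kurawalBelakangLoop teks fuel state' (i + 1)
              (if state' = "error" then false else status)
          | none => state
        | _, _ => state
      else state

def kurawalBelakangMain (teks0 : List Char) : String :=
  let teks := teks0 ++ ['#']                       -- teks += '#'
  -- teks[0]: teks is nonempty ('#' appended), so the headD default is never used
  let status := (teks.headD '#' != '#') && inTerminal teks ['}']
  let state := kurawalBelakangLoop teks teks.length "Q0" 0 status
  if state ≠ "kurawalBlk" then "error" else state

def kurawalBelakang (teks : List String) : String :=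
  kurawalBelakangMain (PySem.Str.join "" teks).toList   -- teks = ''.join(teks)

-- ===== PORT B =====
def kurawalBelakang_alt (teks : List String) : String :=
  let s := PySem.Str.join "" teks                       -- teks = ''.join(teks)
  if s = "}" then "kurawalBlk" else "error"

-- ===== PRECONDITION & SPEC =====
def Spec_kurawalBelakang (teks : List String) (out : String) : Prop := out = kurawalBelakang_alt teks
instance (teks : List String) (out : String) : Decidable (Spec_kurawalBelakang teks out) := by unfold Spec_kurawalBelakang; infer_instance

-- ===== CLAIM (what is proved, stated in full; the proofs are below) =====
def Claim_equal_kurawalBelakang : Prop := ∀ (teks : List String), Dom_kurawalBelakang teks → Spec_kurawalBelakang teks (kurawalBelakang teks)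

-- ===== LEMMAS AND PROOFS =====

-- with status = false both loops return immediately
theorem inTerminalLoop_ofFalse (teks terminal : List Char) (fuel i : Nat) :
    inTerminalLoop teks terminal fuel i false = false := by
  cases fuel with
  | zero => rfl
  | succ fuel => simp [inTerminalLoop]

theorem kurawalBelakangLoop_ofFalse (teks : List Char) (fuel : Nat) (state : String) (i : Nat) :
    kurawalBelakangLoop teks fuel state i false = state := by
  cases fuel with
  | zero => rfl
  | succ fuel =>
    rw [kurawalBelakangLoop]
    cases PySem.List.pyGet? teks (Int.ofNat i) <;> simp

-- if some scanned position holds a character outside terminal, the scan ends false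
theorem inTerminalLoop_false_of_bad (teks terminal : List Char) :
    ∀ (fuel i : Nat), (∃ j, i ≤ j ∧ j < teks.length - 1 ∧ teks.getD j '#' ∉ terminal) →
      teks.length - 1 - i ≤ fuel → inTerminalLoop teks terminal fuel i true = false := by
  intro fuel
  induction fuel with
  | zero => intro i ⟨j, hij, hj, _⟩ hfuel; omega
  | succ fuel ih =>
    intro i ⟨j, hij, hj, hbad⟩ hfuel
    rw [inTerminalLoop]
    have hi : i < teks.length - 1 := by omega
    simp only [hi, and_self, if_pos]
    by_cases hcur : teks.getD i '#' ∈ terminal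
    · have hij' : i ≠ j := by intro h; exact hbad (h ▸ hcur)
      simp only [hcur, if_pos]
      exact ih (i + 1) ⟨j, by omega, hj, hbad⟩ (by omega)
    · simp only [hcur, if_false]
      exact inTerminalLoop_ofFalse teks terminal fuel (i + 1)

theorem kurawalBelakangMain_eq (cs : List Char) :
    kurawalBelakangMain cs = (if cs = ['}'] then "kurawalBlk" else "error") := by
  by_cases hall : ∀ c ∈ cs, c = '}'
  · -- all characters are '}' : result depends only on the length
    match cs, hall with
    | [], _ =>
      simp [kurawalBelakangMain, kurawalBelakangLoop, inTerminal, inTerminalLoop]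
    | [c], hall =>
      have : c = '}' := hall c (by simp)
      subst this
      simp [kurawalBelakangMain, kurawalBelakangLoop, inTerminal, inTerminalLoop,
        PySem.List.pyGet?, PySem.List.pyIdx?, PySem.List.index?, List.idxOf?,
        List.findIdx?, List.findIdx?.go, Option.bind]
    | c1 :: c2 :: r, hall =>
      have h1 : c1 = '}' := hall c1 (by simp)
      have h2 : c2 = '}' := hall c2 (by simp)
      subst h1; subst h2
      have hne : ('}' :: '}' :: r : List Char) ≠ ['}'] := by simp
      rw [if_neg hne]
      show (if kurawalBelakangLoop _ _ "Q0" 0 _ ≠ "kurawalBlk" then "error" else _) = "error"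
      -- case on the computed initial status : Bool
      cases hs : (((('}' :: '}' :: r : List Char) ++ ['#']).headD '#' != '#') &&
          inTerminal (('}' :: '}' :: r : List Char) ++ ['#']) ['}']) with
      | false => simp [kurawalBelakangLoop_ofFalse]
      | true =>
        -- two automaton steps: Q0 --'}'--> kurawalBlk --'}'--> error, then status = false
        rw [show (('}' :: '}' :: r : List Char) ++ ['#']).length
              = ('}' :: '}' :: r : List Char).length + 1 by rw [List.length_append]; rfl]
        rw [kurawalBelakangLoop]
        simp [List.idxOf?, List.findIdx?, List.findIdx?.go]
        have hX : kurawalBelakangLoop ('}' :: '}' :: (r ++ ['#'])) (r.length + 1 + 1)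
            "kurawalBlk" 1 true = "error" := by
          rw [kurawalBelakangLoop]
          have hg1 : PySem.List.pyGet? ('}' :: '}' :: (r ++ ['#'])) (Int.ofNat 1) = some '}' := by
            rw [show (Int.ofNat 1) = ((1 : Nat) : Int) from rfl, PySem.List.pyGet?_natCast]
            simp
          rw [hg1]
          simp [List.idxOf?, List.findIdx?, List.findIdx?.go, kurawalBelakangLoop_ofFalse]
        simp [hX]
  · -- some character is not '}' : inTerminal scans it and fails, so status = false
    simp only [not_forall, exists_prop] at hall
    obtain ⟨c, hc, hcne⟩ := hall
    obtain ⟨j, hj, hget⟩ := List.getElem_of_mem hc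
    have hne : cs ≠ ['}'] := by
      intro h; subst h
      simp at hc; exact hcne hc
    rw [if_neg hne]
    show (if kurawalBelakangLoop _ _ "Q0" 0 _ ≠ "kurawalBlk" then "error" else _) = "error"
    have hbad : inTerminal (cs ++ ['#']) ['}'] = false := by
      apply inTerminalLoop_false_of_bad
      · refine ⟨j, Nat.zero_le _, by simp; omega, ?_⟩
        rw [List.getD_eq_getElem?_getD, List.getElem?_append_left hj,
          List.getElem?_eq_getElem hj]
        simpa [hget] using hcne
      · simp
    simp [hbad, kurawalBelakangLoop_ofFalse]

-- ===== VERDICT (by name: the statement is the Claim_ definition above) =====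
theorem kurawalBelakang_spec : Claim_equal_kurawalBelakang := by
  intro teks _
  unfold Spec_kurawalBelakang kurawalBelakang kurawalBelakang_alt
  rw [kurawalBelakangMain_eq]
  by_cases h : PySem.Str.join "" teks = "}"
  · rw [h, if_pos (by simp), if_pos rfl]
  · have h' : (PySem.Str.join "" teks).toList ≠ ['}'] := by
      intro hl
      apply h
      have := congrArg String.ofList hl
      simpa using this
    rw [if_neg h', if_neg h]
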